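-- pv_equiv track=rewrite | github.com/MrBrantCode/unitest_baseline | mut_generate/mist_train_cf/cf_63365/solution.py | sum_of_cubed_odd_numbers
-- ===== SOURCE A (Python) =====
-- def sum_of_cubed_odd_numbers(n):
--     """
--     Calculate the sum of all cubed odd numbers before a given number n.
--
--     Args:
--     n (int): The upper limit.
--
--     Returns:
--     int: The sum of all cubed odd numbers before n.
--
--     Raises:
--     Exception: Any potential errors during the calculation.
--     """
--     try:
--         total = 0
--         for j in range(1, n, 2):
--             total += j ** 3
--         return total
--     except Exception as e:
--         raise Exception(f"An error occurred: {e}")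
-- ===== SOURCE B (Python) =====
-- def sum_of_cubed_odd_numbers(n):
--     # Closed form: the sum of the first m odd cubes is m^2 * (2*m^2 - 1),
--     # where m is the number of odd numbers below n.
--     if n <= 1:
--         return 0
--     m = n // 2
--     return m * m * (2 * m * m - 1)
-- ===== Notes on version B (the rewrite author's own statement) =====
-- stated objective: faster
-- what changed: Replaces the linear loop over the odd numbers below n with a constant-time closed form: the sum of the first m odd cubes is m^2*(2m^2-1), where m is the number of terms.
import Mathlib
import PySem

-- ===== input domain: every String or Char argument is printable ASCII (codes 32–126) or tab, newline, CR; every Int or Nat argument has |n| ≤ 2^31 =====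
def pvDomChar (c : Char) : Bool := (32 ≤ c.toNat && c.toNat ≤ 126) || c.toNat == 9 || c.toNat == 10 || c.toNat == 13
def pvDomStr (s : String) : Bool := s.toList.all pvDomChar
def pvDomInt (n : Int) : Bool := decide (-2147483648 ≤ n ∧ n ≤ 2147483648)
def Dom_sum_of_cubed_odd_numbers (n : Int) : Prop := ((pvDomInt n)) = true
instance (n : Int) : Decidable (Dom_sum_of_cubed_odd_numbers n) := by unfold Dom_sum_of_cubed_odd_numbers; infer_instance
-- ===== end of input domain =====

-- B replaces A's linear loop over the odd numbers below n with the constant-time closed form m^2*(2m^2-1), m the term count (timing: B measured faster).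
-- ===== PORT A =====
-- for j in range(1, n, 2): total += j ** 3
def sum_of_cubed_odd_numbers (n : Int) : Int :=
  (PySem.List.pyRange 1 n 2).foldl (fun total j => total + j ^ 3) 0

-- ===== PORT B =====
def sum_of_cubed_odd_numbers_alt (n : Int) : Int :=
  if n ≤ 1 then 0
  else
    let m := PySem.Int.floordiv n 2
    m * m * (2 * m * m - 1)

-- ===== PRECONDITION & SPEC =====
def Spec_sum_of_cubed_odd_numbers (n : Int) (out : Int) : Prop := out = sum_of_cubed_odd_numbers_alt n
instance (n : Int) (out : Int) : Decidable (Spec_sum_of_cubed_odd_numbers n out) := by unfold Spec_sum_of_cubed_odd_numbers; infer_instance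

-- ===== CLAIM (what is proved, stated in full; the proofs are below) =====
def Claim_equal_sum_of_cubed_odd_numbers : Prop := ∀ (n : Int), Dom_sum_of_cubed_odd_numbers n → Spec_sum_of_cubed_odd_numbers n (sum_of_cubed_odd_numbers n)

-- ===== LEMMAS AND PROOFS =====

-- ===== VERDICT (by name: the statement is the Claim_ definition above) =====
lemma foldl_cube (l : List Int) (c : Int) :
    l.foldl (fun total j => total + j ^ 3) c = c + (l.map (fun j => j ^ 3)).sum := by
  induction l generalizing c with
  | nil => simp
  | cons x xs ih => simp [List.foldl_cons, ih]; ring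

lemma sum_odd_cubes (m : Nat) :
    ((List.range m).map (fun k : Nat => ((1 : Int) + 2 * (k : Int)) ^ 3)).sum
      = (m : Int) * m * (2 * ((m : Int) * m) - 1) := by
  induction m with
  | zero => simp
  | succ m ih =>
    rw [List.range_succ, List.map_append, List.sum_append, ih]
    simp only [List.map_cons, List.map_nil, List.sum_cons, List.sum_nil]
    push_cast
    ring

-- ===== VERDICT (by name: the statement is the Claim_ definition above) =====
theorem sum_of_cubed_odd_numbers_spec : Claim_equal_sum_of_cubed_odd_numbers := by
  intro n _
  unfold Spec_sum_of_cubed_odd_numbers sum_of_cubed_odd_numbers sum_of_cubed_odd_numbers_alt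
  rw [PySem.List.pyRange_of_pos 1 n (by norm_num), foldl_cube, List.map_map]
  by_cases h : n ≤ 1
  · simp [h, show ¬ (1 : Int) < n by omega]
  · have h1 : (1 : Int) < n := by omega
    simp only [if_pos h1, if_neg h]
    have : ((fun j : Int => j ^ 3) ∘ fun k : Nat => 1 + 2 * (k : Int))
        = fun k : Nat => ((1 : Int) + 2 * (k : Int)) ^ 3 := rfl
    rw [this, sum_odd_cubes]
    have hm : PySem.Int.floordiv n 2 = (n - 1 + 2 - 1) / 2 := by
      show Int.fdiv n 2 = (n - 1 + 2 - 1) / 2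
      have hn : n - 1 + 2 - 1 = n := by ring
      rw [hn, Int.fdiv_eq_ediv]
      simp
    have hnn : 0 ≤ (n - 1 + 2 - 1) / 2 := by omega
    rw [hm, Int.toNat_of_nonneg hnn]
    ring
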